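-- pv_equiv track=rewrite | github.com/lucweytingh/datavis19 | tomatoes_national.py | insert_if_hilow
-- ===== SOURCE A (Python) =====
-- def insert_if_hilow(win_list, input_list, item_name, region_name, max_length):
--     if input_list == []:
--         if max_length >= len(win_list):
--             min = 0
--         else:
--             min = len(win_list) - max_length
--         return win_list[:max_length], win_list[min:][::-1]
--     if win_list == []:
--         win_list = [((item_name, region_name), input_list[0])]
--         del(input_list[0])
--     while input_list != []:
--         for i in range(len(win_list)):
--             if input_list[0][1] > win_list[i][1][1]:
--                 win_list.insert(i, ((item_name, region_name), input_list[0]))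
--                 del(input_list[0])
--                 break
--             if i == len(win_list) - 1:
--                 win_list.append(((item_name, region_name), input_list[0]))
--                 del(input_list[0])
--                 break
--     if max_length >= len(win_list):
--         min = 0
--     else:
--         min = len(win_list) - max_length
--     return win_list[:max_length], win_list[min:][::-1]
-- ===== SOURCE B (Python) =====
-- def insert_if_hilow(win_list, input_list, item_name, region_name, max_length):
--     # B: stable-sort the new items descending by value once, then a single
--     # merge pass over win_list (A instead re-scans win_list for every item).
--     # Note: unlike A, B does not mutate win_list/input_list; the RETURN value is identical.
--     tag = (item_name, region_name)
--     pending = sorted(input_list, key=lambda t: t[1], reverse=True)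
--     merged = []
--     i = 0
--     for w in win_list:
--         while i < len(pending) and pending[i][1] > w[1][1]:
--             merged.append((tag, pending[i]))
--             i += 1
--         merged.append(w)
--     for p in pending[i:]:
--         merged.append((tag, p))
--     if max_length >= len(merged):
--         lo = 0
--     else:
--         lo = len(merged) - max_length
--     return merged[:max_length], merged[lo:][::-1]
-- ===== Notes on version B (the rewrite author's own statement) =====
-- stated objective: alternative
-- what changed: A repeatedly rescans win_list from the front to insert each new item one at a time; B stable-sorts the new items descending by value once and then merges them into win_list in a single linear pass over win_list.
import Mathlib
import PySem

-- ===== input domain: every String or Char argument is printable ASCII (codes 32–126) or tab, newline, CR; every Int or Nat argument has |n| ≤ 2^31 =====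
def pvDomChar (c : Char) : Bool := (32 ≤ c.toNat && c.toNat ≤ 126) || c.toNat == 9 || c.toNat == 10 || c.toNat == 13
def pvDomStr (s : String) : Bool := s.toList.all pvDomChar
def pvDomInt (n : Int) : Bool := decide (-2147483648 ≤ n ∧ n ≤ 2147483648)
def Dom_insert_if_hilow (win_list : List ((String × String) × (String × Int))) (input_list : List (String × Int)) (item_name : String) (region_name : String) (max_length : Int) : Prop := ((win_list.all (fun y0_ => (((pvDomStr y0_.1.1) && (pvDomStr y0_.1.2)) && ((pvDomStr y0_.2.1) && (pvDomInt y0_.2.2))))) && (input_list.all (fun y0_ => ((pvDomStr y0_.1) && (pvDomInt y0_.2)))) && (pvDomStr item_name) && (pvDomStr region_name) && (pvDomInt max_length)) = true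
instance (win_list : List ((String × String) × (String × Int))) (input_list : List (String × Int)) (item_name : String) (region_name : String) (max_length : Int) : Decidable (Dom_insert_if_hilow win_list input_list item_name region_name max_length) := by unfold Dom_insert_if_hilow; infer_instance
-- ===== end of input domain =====

-- B stable-sorts the new items descending once and merges them into win_list in one pass,
-- instead of A's per-item front-to-back rescans (an alternative algorithm of similar measured
-- cost); return values are proved equal everywhere. A mutates win_list/input_list in place,
-- B does not — only the RETURN value is claimed here.


-- ===== PORT A =====
-- the inner `for i in range(len(win_list))` scan: insert before the first strictly
-- smaller element, append when `i == len(win_list) - 1` is reached without a hit.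
-- (The `[]` clause is unreachable from the loop — A's while body only runs with a
-- nonempty win_list, it is seeded first — it just makes the scan total.)
def pvAIns (item_name region_name : String) (x : String × Int) :
    List ((String × String) × (String × Int)) → List ((String × String) × (String × Int))
  | [] => [((item_name, region_name), x)]
  | w :: ws =>
    if x.2 > w.2.2 then ((item_name, region_name), x) :: w :: ws
    else
      match ws with
      | [] => [w, ((item_name, region_name), x)]
      | _ :: _ => w :: pvAIns item_name region_name x ws

-- the `while input_list != []` loop: each pass consumes input_list[0]
def pvALoop (item_name region_name : String) :
    List ((String × String) × (String × Int)) → List (String × Int) →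
    List ((String × String) × (String × Int))
  | wl, [] => wl
  | wl, x :: xs => pvALoop item_name region_name (pvAIns item_name region_name x wl) xs

-- the duplicated `min = …; return win_list[:max_length], win_list[min:][::-1]` tail
-- ([::-1] is List.reverse, cf. PySem.List.slice?_none_none_neg_one)
def pvAFin (wl : List ((String × String) × (String × Int))) (max_length : Int) :
    (List ((String × String) × (String × Int))) × (List ((String × String) × (String × Int))) :=
  let mn : Int := if max_length ≥ (wl.length : Int) then 0 else (wl.length : Int) - max_length
  (PySem.List.slice wl none (some max_length), (PySem.List.slice wl (some mn) none).reverse)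

def insert_if_hilow (win_list : List ((String × String) × (String × Int))) (input_list : List (String × Int)) (item_name : String) (region_name : String) (max_length : Int) : (List ((String × String) × (String × Int))) × (List ((String × String) × (String × Int))) :=
  match input_list with
  | [] => pvAFin win_list max_length
  | x :: xs =>
    match win_list with
    | [] => pvAFin (pvALoop item_name region_name [((item_name, region_name), x)] xs) max_length
    | _ :: _ => pvAFin (pvALoop item_name region_name win_list (x :: xs)) max_length

-- ===== PORT B =====
-- the merge pass: for each w of win_list emit the pending items still greater than w
-- (the inner `while` on the sorted cursor = takeWhile/dropWhile), then w; leftovers at the end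
def pvBMerge (item_name region_name : String) :
    List ((String × String) × (String × Int)) → List (String × Int) →
    List ((String × String) × (String × Int))
  | [], pend => pend.map (fun p => ((item_name, region_name), p))
  | w :: ws, pend =>
    (pend.takeWhile (fun p => decide (w.2.2 < p.2))).map (fun p => ((item_name, region_name), p))
      ++ w :: pvBMerge item_name region_name ws (pend.dropWhile (fun p => decide (w.2.2 < p.2)))

-- Source B's `lo = …; return merged[:max_length], merged[lo:][::-1]` tail is the very same
-- code as A's pvAFin, so the helper is shared
def insert_if_hilow_alt (win_list : List ((String × String) × (String × Int))) (input_list : List (String × Int)) (item_name : String) (region_name : String) (max_length : Int) : (List ((String × String) × (String × Int))) × (List ((String × String) × (String × Int))) :=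
  pvAFin
    (pvBMerge item_name region_name win_list
      (PySem.List.sorted input_list (fun t => t.2) true))
    max_length

-- ===== PRECONDITION & SPEC =====
def Spec_insert_if_hilow (win_list : List ((String × String) × (String × Int))) (input_list : List (String × Int)) (item_name : String) (region_name : String) (max_length : Int) (out : (List ((String × String) × (String × Int))) × (List ((String × String) × (String × Int)))) : Prop := out = insert_if_hilow_alt win_list input_list item_name region_name max_length
instance (win_list : List ((String × String) × (String × Int))) (input_list : List (String × Int)) (item_name : String) (region_name : String) (max_length : Int) (out : (List ((String × String) × (String × Int))) × (List ((String × String) × (String × Int)))) : Decidable (Spec_insert_if_hilow win_list input_list item_name region_name max_length out) := by unfold Spec_insert_if_hilow; infer_instance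

-- ===== CLAIM (what is proved, stated in full; the proofs are below) =====
def Claim_equal_insert_if_hilow : Prop := ∀ (win_list : List ((String × String) × (String × Int))) (input_list : List (String × Int)) (item_name : String) (region_name : String) (max_length : Int), Dom_insert_if_hilow win_list input_list item_name region_name max_length → Spec_insert_if_hilow win_list input_list item_name region_name max_length (insert_if_hilow win_list input_list item_name region_name max_length)

-- ===== LEMMAS AND PROOFS =====

-- A's scan comparator on tagged entries / B's comparator on raw items
def pvBefE (a b : (String × String) × (String × Int)) : Bool := decide (b.2.2 < a.2.2)
def pvBefP (a b : String × Int) : Bool := decide (b.2 < a.2)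

-- A's scan is insertBy with pvBefE
theorem pvAIns_eq_insertBy (nm rg : String) (x : String × Int)
    (l : List ((String × String) × (String × Int))) :
    pvAIns nm rg x l = PySem.List.insertBy pvBefE ((nm, rg), x) l := by
  induction l with
  | nil => rfl
  | cons w ws ih =>
    cases ws with
    | nil =>
      rw [show pvAIns nm rg x [w]
            = if x.2 > w.2.2 then ((nm, rg), x) :: [w] else [w, ((nm, rg), x)] from rfl,
        show PySem.List.insertBy pvBefE ((nm, rg), x) [w]
            = if pvBefE ((nm, rg), x) w then ((nm, rg), x) :: [w]
              else [w, ((nm, rg), x)] from rfl]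
      by_cases h : w.2.2 < x.2
      · rw [if_pos (by omega), if_pos (by simpa [pvBefE] using h)]
      · rw [if_neg (by omega), if_neg (by simpa [pvBefE] using h)]
    | cons a as =>
      rw [show pvAIns nm rg x (w :: a :: as)
            = if x.2 > w.2.2 then ((nm, rg), x) :: w :: a :: as
              else w :: pvAIns nm rg x (a :: as) from rfl,
        show PySem.List.insertBy pvBefE ((nm, rg), x) (w :: a :: as)
            = if pvBefE ((nm, rg), x) w then ((nm, rg), x) :: w :: a :: as
              else w :: PySem.List.insertBy pvBefE ((nm, rg), x) (a :: as) from rfl]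
      by_cases h : w.2.2 < x.2
      · rw [if_pos (by omega), if_pos (by simpa [pvBefE] using h)]
      · rw [if_neg (by omega), if_neg (by simpa [pvBefE] using h), ih]

theorem insertBy_map_tag (nm rg : String) (x : String × Int) (l : List (String × Int)) :
    PySem.List.insertBy pvBefE ((nm, rg), x) (l.map (fun p => ((nm, rg), p)))
      = (PySem.List.insertBy pvBefP x l).map (fun p => ((nm, rg), p)) := by
  induction l with
  | nil => rfl
  | cons p ps ih =>
    simp only [List.map_cons, PySem.List.insertBy, pvBefE, pvBefP]
    by_cases h : p.2 < x.2 <;> simp [h, ih]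

theorem insertBy_append_not {α : Type} (before : α → α → Bool) (x : α) (A B : List α)
    (h : ∀ y ∈ A, before x y = false) :
    PySem.List.insertBy before x (A ++ B) = A ++ PySem.List.insertBy before x B := by
  induction A with
  | nil => rfl
  | cons a A ih =>
    simp only [List.cons_append, PySem.List.insertBy, h a (by simp)]
    simp [ih (fun y hy => h y (by simp [hy]))]

theorem insertBy_append_stop {α : Type} (before : α → α → Bool) (x w : α) (A M : List α)
    (h : before x w = true) :
    PySem.List.insertBy before x (A ++ w :: M) = PySem.List.insertBy before x A ++ w :: M := by
  induction A with
  | nil => simp [PySem.List.insertBy, h]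
  | cons a A ih =>
    simp only [List.cons_append, PySem.List.insertBy]
    by_cases ha : before x a = true <;> simp [ha, ih]

theorem insertBy_pairwise_desc (x : String × Int) (l : List (String × Int))
    (h : l.Pairwise (fun a b => b.2 ≤ a.2)) :
    (PySem.List.insertBy pvBefP x l).Pairwise (fun a b => b.2 ≤ a.2) := by
  induction l with
  | nil => simp [PySem.List.insertBy]
  | cons p ps ih =>
    rw [List.pairwise_cons] at h
    simp only [PySem.List.insertBy, pvBefP]
    by_cases hc : p.2 < x.2
    · rw [if_pos (by simpa using hc), List.pairwise_cons]
      refine ⟨?_, List.pairwise_cons.2 h⟩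
      intro y hy
      rcases List.mem_cons.1 hy with hy | hy
      · subst hy; omega
      · have := h.1 y hy; omega
    · rw [if_neg (by simpa using hc), List.pairwise_cons]
      refine ⟨?_, ih h.2⟩
      intro y hy
      rcases (PySem.List.mem_insertBy pvBefP x y ps).1 hy with hy | hy
      · subst hy; omega
      · exact h.1 y hy

theorem pvBMerge_nil (nm rg : String) (wl : List ((String × String) × (String × Int))) :
    pvBMerge nm rg wl [] = wl := by
  induction wl with
  | nil => rfl
  | cons w ws ih => simp [pvBMerge, ih]

theorem takeWhile_append_all {α : Type} (c : α → Bool) (A B : List α)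
    (h : ∀ y ∈ A, c y = true) :
    (A ++ B).takeWhile c = A ++ B.takeWhile c := by
  induction A with
  | nil => rfl
  | cons a A ih =>
    simp only [List.cons_append, List.takeWhile_cons]
    rw [h a (by simp)]
    simp only [if_true]
    simp [ih (fun y hy => h y (by simp [hy]))]

theorem dropWhile_append_all {α : Type} (c : α → Bool) (A B : List α)
    (h : ∀ y ∈ A, c y = true) :
    (A ++ B).dropWhile c = B.dropWhile c := by
  induction A with
  | nil => rfl
  | cons a A ih =>
    simp only [List.cons_append, List.dropWhile_cons]
    rw [h a (by simp)]
    simp only [if_true]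
    simp [ih (fun y hy => h y (by simp [hy]))]

-- a list all of whose elements fail the test is untouched by takeWhile/dropWhile
theorem takeWhile_eq_nil_of_all {α : Type} (c : α → Bool) (l : List α)
    (h : ∀ y ∈ l, c y = false) : l.takeWhile c = [] := by
  cases l with
  | nil => rfl
  | cons a l => simp [h a (by simp)]

theorem dropWhile_eq_self_of_all {α : Type} (c : α → Bool) (l : List α)
    (h : ∀ y ∈ l, c y = false) : l.dropWhile c = l := by
  cases l with
  | nil => rfl
  | cons a l => simp [h a (by simp)]

-- every element surviving dropWhile of a descending-sorted list fails the (upward-closed) test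
theorem dropWhile_all_false (w : Int) (l : List (String × Int))
    (h : l.Pairwise (fun a b => b.2 ≤ a.2)) :
    ∀ d ∈ l.dropWhile (fun p => decide (w < p.2)), ¬ w < d.2 := by
  induction l with
  | nil => simp
  | cons p ps ih =>
    rw [List.pairwise_cons] at h
    by_cases hc : w < p.2
    · simpa [List.dropWhile_cons, hc] using ih h.2
    · simp only [List.dropWhile_cons, decide_eq_true_eq, if_neg hc]
      intro d hd
      rcases List.mem_cons.1 hd with hd | hd
      · subst hd; omega
      · have := h.1 d hd; omega

-- the key step: A's single insertion into a merged list = merging after inserting into pending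
theorem pvKey (nm rg : String) (x : String × Int)
    (wl : List ((String × String) × (String × Int))) (pend : List (String × Int))
    (hs : pend.Pairwise (fun a b => b.2 ≤ a.2)) :
    PySem.List.insertBy pvBefE ((nm, rg), x) (pvBMerge nm rg wl pend)
      = pvBMerge nm rg wl (PySem.List.insertBy pvBefP x pend) := by
  induction wl generalizing pend with
  | nil => exact insertBy_map_tag nm rg x pend
  | cons w ws ih =>
    have hDfail : ∀ d ∈ pend.dropWhile (fun p => decide (w.2.2 < p.2)),
        (fun p => decide (w.2.2 < p.2)) d = false := by
      intro d hd
      have := dropWhile_all_false w.2.2 pend hs d hd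
      simpa using this
    by_cases hx : w.2.2 < x.2
    · -- x is emitted before w on both sides
      have hsplit : PySem.List.insertBy pvBefP x pend
          = PySem.List.insertBy pvBefP x (pend.takeWhile (fun p => decide (w.2.2 < p.2)))
            ++ pend.dropWhile (fun p => decide (w.2.2 < p.2)) := by
        rcases hD : pend.dropWhile (fun p => decide (w.2.2 < p.2)) with _ | ⟨d, ds⟩
        · conv_lhs => rw [← List.takeWhile_append_dropWhile
            (p := fun p : String × Int => decide (w.2.2 < p.2)) (l := pend)]
          rw [hD]; simp
        · have hd : pvBefP x d = true := by
            have := dropWhile_all_false w.2.2 pend hs d (by rw [hD]; simp)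
            simp only [pvBefP, decide_eq_true_eq]; omega
          conv_lhs => rw [← List.takeWhile_append_dropWhile
            (p := fun p : String × Int => decide (w.2.2 < p.2)) (l := pend)]
          rw [hD]
          exact insertBy_append_stop _ _ _ _ _ hd
      -- all elements of the inserted takeWhile block still pass the test
      have hall : ∀ y ∈ PySem.List.insertBy pvBefP x
          (pend.takeWhile (fun p => decide (w.2.2 < p.2))),
          (fun p => decide (w.2.2 < p.2)) y = true := by
        intro y hy
        rcases (PySem.List.mem_insertBy pvBefP x y _).1 hy with hy | hy
        · subst hy; simpa using hx
        · exact List.mem_takeWhile_imp (p := fun p : String × Int => decide (w.2.2 < p.2)) hy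
      rw [hsplit]
      rw [show pvBMerge nm rg (w :: ws)
            (PySem.List.insertBy pvBefP x (pend.takeWhile (fun p => decide (w.2.2 < p.2)))
              ++ pend.dropWhile (fun p => decide (w.2.2 < p.2)))
          = ((PySem.List.insertBy pvBefP x (pend.takeWhile (fun p => decide (w.2.2 < p.2)))
              ++ pend.dropWhile (fun p => decide (w.2.2 < p.2))).takeWhile
                (fun p => decide (w.2.2 < p.2))).map (fun p => ((nm, rg), p))
            ++ w :: pvBMerge nm rg ws
              ((PySem.List.insertBy pvBefP x (pend.takeWhile (fun p => decide (w.2.2 < p.2)))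
                ++ pend.dropWhile (fun p => decide (w.2.2 < p.2))).dropWhile
                  (fun p => decide (w.2.2 < p.2)))
          from rfl]
      rw [takeWhile_append_all _ _ _ hall, dropWhile_append_all _ _ _ hall,
        takeWhile_eq_nil_of_all _ _ hDfail, dropWhile_eq_self_of_all _ _ hDfail,
        List.append_nil]
      -- LHS: insert into map tag (takeWhile) ++ w :: rest, stopping at w
      rw [show pvBMerge nm rg (w :: ws) pend
          = ((pend.takeWhile (fun p => decide (w.2.2 < p.2))).map (fun p => ((nm, rg), p)))
            ++ w :: pvBMerge nm rg ws (pend.dropWhile (fun p => decide (w.2.2 < p.2)))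
          from rfl]
      rw [insertBy_append_stop pvBefE _ w _ _ (by simp [pvBefE]; omega)]
      rw [insertBy_map_tag]
    · -- x passes w on both sides
      have hTfalseP : ∀ p ∈ pend.takeWhile (fun p => decide (w.2.2 < p.2)),
          pvBefP x p = false := by
        intro p hp
        have := List.mem_takeWhile_imp (p := fun p : String × Int => decide (w.2.2 < p.2)) hp
        simp only [decide_eq_true_eq] at this
        simp only [pvBefP, decide_eq_false_iff_not]; omega
      have hTfalse : ∀ y ∈ (pend.takeWhile (fun p => decide (w.2.2 < p.2))).map
          (fun p => ((nm, rg), p)), pvBefE ((nm, rg), x) y = false := by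
        intro y hy
        rcases List.mem_map.1 hy with ⟨p, hp, rfl⟩
        simpa [pvBefE] using by simpa [pvBefP] using hTfalseP p hp
      have hwfalse : pvBefE ((nm, rg), x) w = false := by
        simp only [pvBefE, decide_eq_false_iff_not]; omega
      -- insertion happens entirely inside the dropped part
      have hsplit : PySem.List.insertBy pvBefP x pend
          = pend.takeWhile (fun p => decide (w.2.2 < p.2))
            ++ PySem.List.insertBy pvBefP x
              (pend.dropWhile (fun p => decide (w.2.2 < p.2))) := by
        conv_lhs => rw [← List.takeWhile_append_dropWhile
          (p := fun p : String × Int => decide (w.2.2 < p.2)) (l := pend)]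
        exact insertBy_append_not pvBefP x _ _ hTfalseP
      have hIfail : ∀ d ∈ PySem.List.insertBy pvBefP x
          (pend.dropWhile (fun p => decide (w.2.2 < p.2))),
          (fun p => decide (w.2.2 < p.2)) d = false := by
        intro d hd
        rcases (PySem.List.mem_insertBy pvBefP x d _).1 hd with hd | hd
        · subst hd; simpa using hx
        · exact hDfail d hd
      rw [hsplit]
      rw [show pvBMerge nm rg (w :: ws)
            (pend.takeWhile (fun p => decide (w.2.2 < p.2))
              ++ PySem.List.insertBy pvBefP x
                (pend.dropWhile (fun p => decide (w.2.2 < p.2))))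
          = ((pend.takeWhile (fun p => decide (w.2.2 < p.2))
              ++ PySem.List.insertBy pvBefP x
                (pend.dropWhile (fun p => decide (w.2.2 < p.2)))).takeWhile
                  (fun p => decide (w.2.2 < p.2))).map (fun p => ((nm, rg), p))
            ++ w :: pvBMerge nm rg ws
              ((pend.takeWhile (fun p => decide (w.2.2 < p.2))
                ++ PySem.List.insertBy pvBefP x
                  (pend.dropWhile (fun p => decide (w.2.2 < p.2)))).dropWhile
                    (fun p => decide (w.2.2 < p.2)))
          from rfl]
      rw [takeWhile_append_all _ _ _
          (fun y hy => List.mem_takeWhile_imp (p := fun p : String × Int => decide (w.2.2 < p.2)) hy),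
        dropWhile_append_all _ _ _
          (fun y hy => List.mem_takeWhile_imp (p := fun p : String × Int => decide (w.2.2 < p.2)) hy),
        takeWhile_eq_nil_of_all _ _ hIfail, dropWhile_eq_self_of_all _ _ hIfail,
        List.append_nil]
      -- LHS: skip the tagged takeWhile block and w, recurse
      rw [show pvBMerge nm rg (w :: ws) pend
          = ((pend.takeWhile (fun p => decide (w.2.2 < p.2))).map (fun p => ((nm, rg), p)))
            ++ w :: pvBMerge nm rg ws (pend.dropWhile (fun p => decide (w.2.2 < p.2)))
          from rfl]
      rw [insertBy_append_not pvBefE _ _ _ hTfalse]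
      rw [show PySem.List.insertBy pvBefE ((nm, rg), x)
            (w :: pvBMerge nm rg ws (pend.dropWhile (fun p => decide (w.2.2 < p.2))))
          = w :: PySem.List.insertBy pvBefE ((nm, rg), x)
              (pvBMerge nm rg ws (pend.dropWhile (fun p => decide (w.2.2 < p.2))))
          from by simp [PySem.List.insertBy, hwfalse]]
      rw [ih _ (hs.sublist (List.dropWhile_sublist _))]

-- the whole A loop over a merged state = merging the insertBy-fold of the pending items
theorem pvMainLoop (nm rg : String) (il : List (String × Int)) :
    ∀ (wl : List ((String × String) × (String × Int))) (pend : List (String × Int)),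
    pend.Pairwise (fun a b => b.2 ≤ a.2) →
    pvALoop nm rg (pvBMerge nm rg wl pend) il
      = pvBMerge nm rg wl (il.foldl (fun acc x => PySem.List.insertBy pvBefP x acc) pend) := by
  induction il with
  | nil => intro wl pend _; rfl
  | cons x xs ih =>
    intro wl pend hs
    simp only [pvALoop, List.foldl_cons]
    rw [pvAIns_eq_insertBy, pvKey nm rg x wl pend hs]
    exact ih wl _ (insertBy_pairwise_desc x pend hs)

-- sorted(input, key=val, reverse=True) is exactly the insertBy-fold pvMainLoop produces
theorem pvSorted_eq_foldl (il : List (String × Int)) :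
    PySem.List.sorted il (fun t => t.2) true
      = il.foldl (fun acc x => PySem.List.insertBy pvBefP x acc) [] := by
  rw [PySem.List.sorted_rev_eq_foldl_insertBy]
  rfl

-- ===== VERDICT (by name: the statement is the Claim_ definition above) =====
theorem insert_if_hilow_spec : Claim_equal_insert_if_hilow := by
  intro wl il nm rg ml _dom
  unfold Spec_insert_if_hilow insert_if_hilow insert_if_hilow_alt
  cases il with
  | nil =>
    rw [pvSorted_eq_foldl, List.foldl_nil, pvBMerge_nil]
  | cons x xs =>
    cases wl with
    | nil =>
      have h := pvMainLoop nm rg xs [] [x] (List.pairwise_singleton _ x)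
      rw [show pvBMerge nm rg [] [x] = [((nm, rg), x)] from rfl] at h
      rw [pvSorted_eq_foldl, List.foldl_cons,
        show PySem.List.insertBy pvBefP x [] = [x] from rfl, ← h]
    | cons w ws =>
      have h := pvMainLoop nm rg (x :: xs) (w :: ws) [] List.Pairwise.nil
      rw [pvBMerge_nil] at h
      rw [pvSorted_eq_foldl, ← h]
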